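-- pv_equiv track=rewrite | github.com/yusong652/pfc-mcp | pfc-bridge/src/pfc_mcp_bridge/utils/command_splitter.py | split_pfc_commands
-- ===== SOURCE A (Python) =====
-- def split_pfc_commands(multiline_str):
--     # type: (str) -> List[str]
--     """Split a multi-line PFC command string into individual commands.
--
--     Handles:
--     - Newline-separated commands
--     - PFC line continuation with '...' at end of line
--     - PFC comments starting with ';'
--     - Empty/whitespace-only lines
--
--     Args:
--         multiline_str: Multi-line PFC command string
--
--     Returns:
--         List of individual PFC command strings
--     """
--     lines = multiline_str.split("\n")
--     commands = []
--     current = []  # type: List[str]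
--
--     for line in lines:
--         stripped = line.strip()
--
--         # Skip empty lines and pure comment lines
--         if not stripped or stripped.startswith(";"):
--             continue
--
--         # Check for PFC line continuation (... at end)
--         if stripped.endswith("..."):
--             # Remove the '...' and accumulate
--             current.append(stripped[:-3].rstrip())
--             continue
--
--         # No continuation — complete the current command
--         current.append(stripped)
--         joined = " ".join(current)
--         if joined.strip():
--             commands.append(joined.strip())
--         current = []
--
--     # Flush any remaining continuation
--     if current:
--         joined = " ".join(current)
--         if joined.strip():
--             commands.append(joined.strip())
--
--     return commands
-- ===== SOURCE B (Python) =====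
-- def split_pfc_commands(multiline_str):
--     # type: (str) -> List[str]
--     """Split a multi-line PFC command string into individual commands.
--
--     Two-phase: first clean the lines (strip, drop empties and ';' comments),
--     then group each run of '...'-continued lines with its terminating line.
--     """
--     cleaned = [ln for ln in (raw.strip() for raw in multiline_str.split("\n"))
--                if ln and not ln.startswith(";")]
--     commands = []
--     i, n = 0, len(cleaned)
--     while i < n:
--         parts = []
--         while i < n and cleaned[i].endswith("..."):
--             parts.append(cleaned[i][:-3].rstrip())
--             i += 1
--         if i < n:
--             parts.append(cleaned[i])
--             i += 1
--         cmd = " ".join(parts).strip()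
--         if cmd:
--             commands.append(cmd)
--     return commands
-- ===== Notes on version B (the rewrite author's own statement) =====
-- stated objective: simpler
-- what changed: A's fused single loop carrying a (commands, current) accumulator with a post-loop flush is replaced by a two-phase decomposition: one comprehension cleans the lines (strip, drop empties and ';' comments), then a grouping pass consumes each run of '...'-continued lines together with its terminating line and emits one command per group, with no trailing-flush special case in the state.
import Mathlib
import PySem

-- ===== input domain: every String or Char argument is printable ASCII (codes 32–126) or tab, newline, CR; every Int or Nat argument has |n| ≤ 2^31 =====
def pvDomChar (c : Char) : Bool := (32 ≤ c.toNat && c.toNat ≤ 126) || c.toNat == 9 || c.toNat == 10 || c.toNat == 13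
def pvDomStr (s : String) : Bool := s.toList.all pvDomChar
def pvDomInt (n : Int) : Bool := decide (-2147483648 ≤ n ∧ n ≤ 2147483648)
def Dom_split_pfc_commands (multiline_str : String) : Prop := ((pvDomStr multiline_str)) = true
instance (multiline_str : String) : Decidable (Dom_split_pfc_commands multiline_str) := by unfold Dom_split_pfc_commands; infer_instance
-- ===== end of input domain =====

-- B replaces A's fused accumulator loop by a two-phase decomposition (clean the lines, then
-- group each continuation run with its terminating line); objective: simpler, same cost.

-- ===== PORT A =====
-- one iteration of A's loop; state = (commands, current)
def pvStepA (st : List String × List String) (line : String) : List String × List String :=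
  let stripped := PySem.Str.strip line
  if (stripped == "" || PySem.Str.startswith stripped ";") = true then st
  else if PySem.Str.endswith stripped "..." = true then
    (st.1, st.2 ++ [PySem.Str.rstrip (PySem.Str.slice stripped none (some (-3)))])
  else
    let current := st.2 ++ [stripped]
    let joined := PySem.Str.join " " current
    ((if PySem.Str.strip joined ≠ "" then st.1 ++ [PySem.Str.strip joined] else st.1), [])

-- split("\n"): sep is the non-empty literal "\n", so Str.split? is always `some`; .getD [] is exact
def split_pfc_commands (multiline_str : String) : List String :=
  let lines := (PySem.Str.split? multiline_str "\n").getD []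
  let st := lines.foldl pvStepA ([], [])
  if st.2 ≠ [] then
    let joined := PySem.Str.join " " st.2
    if PySem.Str.strip joined ≠ "" then st.1 ++ [PySem.Str.strip joined] else st.1
  else st.1

-- ===== PORT B =====
-- Source B's inner while loop: split the cleaned list into the leading run of '...'-continued
-- lines (already cut and rstripped) plus the terminating line, and the remaining lines.
def pvTakeFrag : List String → List String × List String
  | [] => ([], [])
  | l :: ls =>
    if PySem.Str.endswith l "..." = true then
      let pr := pvTakeFrag ls
      (PySem.Str.rstrip (PySem.Str.slice l none (some (-3))) :: pr.1, pr.2)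
    else ([l], ls)

theorem pvTakeFrag_rest_le : ∀ ls : List String, (pvTakeFrag ls).2.length ≤ ls.length := by
  intro ls
  induction ls with
  | nil => simp [pvTakeFrag]
  | cons l ls ih =>
    simp only [pvTakeFrag]
    split
    · exact Nat.le_succ_of_le ih
    · exact Nat.le_succ _

-- Source B's outer while loop over the cleaned lines
def pvGroups : List String → List String
  | [] => []
  | l :: ls =>
    let pr := pvTakeFrag (l :: ls)
    let cmd := PySem.Str.strip (PySem.Str.join " " pr.1)
    (if cmd ≠ "" then [cmd] else []) ++ pvGroups pr.2
  termination_by ls => ls.length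
  decreasing_by
    simp only [pvTakeFrag]
    split
    · exact Nat.lt_succ_of_le (pvTakeFrag_rest_le ls)
    · exact Nat.lt_succ_self _

def split_pfc_commands_alt (multiline_str : String) : List String :=
  pvGroups ((((PySem.Str.split? multiline_str "\n").getD []).map PySem.Str.strip).filter
    (fun l => !(l == "" || PySem.Str.startswith l ";")))

-- ===== PRECONDITION & SPEC =====
def Spec_split_pfc_commands (multiline_str : String) (out : List String) : Prop := out = split_pfc_commands_alt multiline_str
instance (multiline_str : String) (out : List String) : Decidable (Spec_split_pfc_commands multiline_str out) := by unfold Spec_split_pfc_commands; infer_instance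

-- ===== CLAIM (what is proved, stated in full; the proofs are below) =====
def Claim_equal_split_pfc_commands : Prop := ∀ (multiline_str : String), Dom_split_pfc_commands multiline_str → Spec_split_pfc_commands multiline_str (split_pfc_commands multiline_str)

-- ===== LEMMAS AND PROOFS =====

-- the fragment both programs store for a continuation line
def pvFrag (l : String) : String := PySem.Str.rstrip (PySem.Str.slice l none (some (-3)))

-- emit a pending command list: " ".join, strip, keep if non-empty
def pvEmit (cur : List String) : List String :=
  if PySem.Str.strip (PySem.Str.join " " cur) ≠ ""
  then [PySem.Str.strip (PySem.Str.join " " cur)] else []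

-- A's loop body restricted to a kept (non-empty, non-comment, already stripped) line
def pvStepK (st : List String × List String) (l : String) : List String × List String :=
  if PySem.Str.endswith l "..." = true then (st.1, st.2 ++ [pvFrag l])
  else (st.1 ++ pvEmit (st.2 ++ [l]), [])

-- functional model of A's remaining work, given the pending fragments cur
def pvProc (cur : List String) : List String → List String
  | [] => pvEmit cur
  | l :: ls =>
    if PySem.Str.endswith l "..." = true then pvProc (cur ++ [pvFrag l]) ls
    else pvEmit (cur ++ [l]) ++ pvProc [] ls

theorem pvEmit_nil : pvEmit [] = [] := by decide

-- A's per-line step: skip the dropped lines, pvStepK on the kept ones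
theorem pvStepA_eq (st : List String × List String) (line : String) :
    pvStepA st line =
      if (!(PySem.Str.strip line == "" || PySem.Str.startswith (PySem.Str.strip line) ";")) = true
      then pvStepK st (PySem.Str.strip line) else st := by
  cases h : (PySem.Str.strip line == "" || PySem.Str.startswith (PySem.Str.strip line) ";") with
  | true =>
    simp only [pvStepA, h, if_true, Bool.not_true, Bool.false_eq_true, if_false]
  | false =>
    simp only [pvStepA, pvStepK, pvFrag, pvEmit, h, Bool.not_false, if_true,
      Bool.false_eq_true, if_false]
    by_cases h2 : PySem.Str.endswith (PySem.Str.strip line) "..." = true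
    · rw [if_pos h2, if_pos h2]
    · rw [if_neg h2, if_neg h2]
      by_cases h3 : PySem.Str.strip (PySem.Str.join " " (st.2 ++ [PySem.Str.strip line])) ≠ ""
      · rw [if_pos h3, if_pos h3]
      · rw [if_neg h3, if_neg h3]; simp

-- A's final flush equals appending pvEmit of the pending list
theorem pvFinish_eq (st : List String × List String) :
    (if st.2 ≠ [] then
        if PySem.Str.strip (PySem.Str.join " " st.2) ≠ ""
        then st.1 ++ [PySem.Str.strip (PySem.Str.join " " st.2)] else st.1
     else st.1) = st.1 ++ pvEmit st.2 := by
  unfold pvEmit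
  by_cases h : st.2 = []
  · rw [if_neg (by simp [h])]
    have : pvEmit [] = [] := pvEmit_nil
    unfold pvEmit at this
    rw [h, this, List.append_nil]
  · rw [if_pos h]
    by_cases h2 : PySem.Str.strip (PySem.Str.join " " st.2) ≠ ""
    · rw [if_pos h2, if_pos h2]
    · rw [if_neg h2, if_neg h2, List.append_nil]

-- loop invariant: folding pvStepK then flushing = commands so far ++ pvProc of the rest
theorem pvFoldK_proc : ∀ (ls : List String) (cmds cur : List String),
    (ls.foldl pvStepK (cmds, cur)).1 ++ pvEmit (ls.foldl pvStepK (cmds, cur)).2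
      = cmds ++ pvProc cur ls := by
  intro ls
  induction ls with
  | nil => intro cmds cur; simp [pvProc]
  | cons l ls ih =>
    intro cmds cur
    rw [List.foldl_cons]
    by_cases h : PySem.Str.endswith l "..." = true
    · have hs : pvStepK (cmds, cur) l = (cmds, cur ++ [pvFrag l]) := by
        simp only [pvStepK, h, if_true]
      rw [hs]
      simp only [pvProc, h, if_true]
      exact ih cmds (cur ++ [pvFrag l])
    · have hs : pvStepK (cmds, cur) l = (cmds ++ pvEmit (cur ++ [l]), []) := by
        simp only [pvStepK, h, Bool.false_eq_true, if_false]
      rw [hs]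
      simp only [pvProc, h, Bool.false_eq_true, if_false]
      rw [ih, List.append_assoc]

-- pvProc peels off exactly one pvTakeFrag group
theorem pvProc_takeFrag : ∀ (ls cur : List String),
    pvProc cur ls = pvEmit (cur ++ (pvTakeFrag ls).1) ++ pvProc [] (pvTakeFrag ls).2 := by
  intro ls
  induction ls with
  | nil => intro cur; simp [pvTakeFrag, pvProc, pvEmit_nil]
  | cons l ls ih =>
    intro cur
    by_cases h : PySem.Str.endswith l "..." = true
    · simp only [pvProc, pvTakeFrag, h, if_true]
      rw [ih (cur ++ [pvFrag l])]
      show pvEmit (cur ++ [pvFrag l] ++ (pvTakeFrag ls).1) ++ _ = _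
      rw [List.append_assoc, List.singleton_append]
      rfl
    · simp only [pvProc, pvTakeFrag, h, Bool.false_eq_true, if_false]

-- B's grouping recursion computes pvProc with an empty pending list
theorem pvGroups_eq_proc : ∀ (ls : List String), pvGroups ls = pvProc [] ls := by
  intro ls
  induction ls using pvGroups.induct with
  | case1 => simp [pvGroups, pvProc, pvEmit_nil]
  | case2 l ls pr ih =>
    rw [pvGroups, pvProc_takeFrag (l :: ls) [], ih]
    show (if PySem.Str.strip (PySem.Str.join " " (pvTakeFrag (l :: ls)).1) ≠ "" then _ else []) ++ _
        = pvEmit ([] ++ (pvTakeFrag (l :: ls)).1) ++ _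
    rw [List.nil_append]
    rfl

-- ===== VERDICT (by name: the statement is the Claim_ definition above) =====
theorem split_pfc_commands_spec : Claim_equal_split_pfc_commands := by
  intro s _
  show split_pfc_commands s = split_pfc_commands_alt s
  simp only [split_pfc_commands, split_pfc_commands_alt, pvGroups_eq_proc]
  have hfold : ((PySem.Str.split? s "\n").getD []).foldl pvStepA ([], []) =
      ((((PySem.Str.split? s "\n").getD []).map PySem.Str.strip).filter
        (fun l => !(l == "" || PySem.Str.startswith l ";"))).foldl pvStepK ([], []) := by
    rw [List.foldl_filter, List.foldl_map]
    congr 1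
    funext st line
    exact pvStepA_eq st line
  rw [hfold, pvFinish_eq, pvFoldK_proc, List.nil_append]
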